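-- pv_equiv track=rewrite | github.com/RangelGasharov/Python_Basics | algorithms/edabit_casino_security.py | security
-- ===== SOURCE A (Python) =====
-- def security(positioning_string):
--     filtered_string = filter_out_empty_spaces(positioning_string)
--     for i in range(1, len(filtered_string)):
--         if filtered_string[i - 1] == "T" and filtered_string[i] == "$":
--             return "ALARM!"
--         if filtered_string[i - 1] == "$" and filtered_string[i] == "T":
--             return "ALARM!"
--     return "Safe"
--
-- def filter_out_empty_spaces(positioning_string):
--     filtered_string = ""
--     for x in positioning_string:
--         if x != "x":
--             filtered_string += x
--     return filtered_string
-- ===== SOURCE B (Python) =====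
-- def security(positioning_string):
--     prev = None
--     for c in positioning_string:
--         if c == "x":
--             continue
--         if prev is not None and ((prev == "T" and c == "$") or (prev == "$" and c == "T")):
--             return "ALARM!"
--         prev = c
--     return "Safe"
-- ===== Notes on version B (the rewrite author's own statement) =====
-- stated objective: faster
-- what changed: Single pass over the original string keeping only the last non-'x' character, instead of building a filtered string by repeated concatenation and then scanning it by index.
import Mathlib
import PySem

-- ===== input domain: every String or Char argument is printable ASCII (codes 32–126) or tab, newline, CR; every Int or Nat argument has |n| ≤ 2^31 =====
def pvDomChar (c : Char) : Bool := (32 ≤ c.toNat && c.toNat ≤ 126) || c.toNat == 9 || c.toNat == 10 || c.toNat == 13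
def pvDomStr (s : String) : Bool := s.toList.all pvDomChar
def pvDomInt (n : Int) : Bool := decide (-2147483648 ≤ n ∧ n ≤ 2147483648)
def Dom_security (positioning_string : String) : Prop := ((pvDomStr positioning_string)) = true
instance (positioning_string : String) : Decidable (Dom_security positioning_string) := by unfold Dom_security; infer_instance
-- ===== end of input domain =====

-- B fuses A's filter pass and index scan into one pass keeping only the last non-'x' character (avoids building the filtered string).


-- ===== PORT A =====
-- filter_out_empty_spaces: builds a new string of the non-'x' characters
def filterOutEmptySpaces (positioning_string : String) : String :=
  positioning_string.toList.foldl (fun acc x => if x ≠ 'x' then acc.push x else acc) ""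

-- the 'for i in range(1, len(filtered_string))' loop with its two early returns
def secLoop (fs : List Char) (i : Nat) : String :=
  if _h : i < fs.length then
    if fs[i-1]! = 'T' ∧ fs[i]! = '$' then "ALARM!"
    else if fs[i-1]! = '$' ∧ fs[i]! = 'T' then "ALARM!"
    else secLoop fs (i+1)
  else "Safe"
termination_by fs.length - i

def security (positioning_string : String) : String :=
  let filtered_string := filterOutEmptySpaces positioning_string
  secLoop filtered_string.toList 1

-- ===== PORT B =====
-- one pass: prev = last non-'x' char seen so far (none initially)
def altLoop (prev : Option Char) (cs : List Char) : String :=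
  match cs with
  | [] => "Safe"
  | c :: rest =>
    if c = 'x' then altLoop prev rest
    else
      match prev with
      | some p =>
        if (p = 'T' ∧ c = '$') ∨ (p = '$' ∧ c = 'T') then "ALARM!"
        else altLoop (some c) rest
      | none => altLoop (some c) rest

def security_alt (positioning_string : String) : String :=
  altLoop none positioning_string.toList

-- ===== PRECONDITION & SPEC =====
def Spec_security (positioning_string : String) (out : String) : Prop := out = security_alt positioning_string
instance (positioning_string : String) (out : String) : Decidable (Spec_security positioning_string out) := by unfold Spec_security; infer_instance

-- ===== CLAIM (what is proved, stated in full; the proofs are below) =====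
def Claim_equal_security : Prop := ∀ (positioning_string : String), Dom_security positioning_string → Spec_security positioning_string (security positioning_string)

-- ===== LEMMAS AND PROOFS =====

-- scan of an already-filtered list, keeping the previous character
def pairScan (prev : Option Char) (cs : List Char) : String :=
  match cs with
  | [] => "Safe"
  | c :: rest =>
    match prev with
    | some p =>
      if (p = 'T' ∧ c = '$') ∨ (p = '$' ∧ c = 'T') then "ALARM!"
      else pairScan (some c) rest
    | none => pairScan (some c) rest

lemma altLoop_eq_pairScan (cs : List Char) : ∀ prev, altLoop prev cs = pairScan prev (cs.filter (· ≠ 'x')) := by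
  induction cs with
  | nil => intro prev; rfl
  | cons c rest ih =>
    intro prev
    by_cases hx : c = 'x'
    · subst hx
      rw [List.filter_cons_of_neg (by simp)]
      simp only [altLoop]
      exact ih prev
    · rw [List.filter_cons_of_pos (by simp [hx])]
      simp only [altLoop, if_neg hx]
      match prev with
      | none =>
        rw [show pairScan none (c :: List.filter (· ≠ 'x') rest)
              = pairScan (some c) (List.filter (· ≠ 'x') rest) from rfl]
        exact ih (some c)
      | some p =>
        by_cases halarm : (p = 'T' ∧ c = '$') ∨ (p = '$' ∧ c = 'T')
        · simp [pairScan, halarm]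
        · simp only [pairScan, if_neg halarm]
          exact ih (some c)

lemma filterOut_toList (s : String) :
    (filterOutEmptySpaces s).toList = s.toList.filter (· ≠ 'x') := by
  unfold filterOutEmptySpaces
  suffices h : ∀ (l : List Char) (acc : String),
      (l.foldl (fun acc x => if x ≠ 'x' then acc.push x else acc) acc).toList
        = acc.toList ++ l.filter (· ≠ 'x') by
    simpa using h s.toList ""
  intro l
  induction l with
  | nil => intro acc; simp
  | cons c rest ih =>
    intro acc
    rw [List.foldl_cons]
    by_cases hx : c = 'x'
    · subst hx
      rw [if_neg (by simp), ih, List.filter_cons_of_neg (by simp)]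
    · rw [if_pos hx, ih, List.filter_cons_of_pos (by simp [hx])]
      simp

lemma secLoop_shift (fs : List Char) (a : Char) (i : Nat) (hi : 1 ≤ i) :
    secLoop (a :: fs) (i+1) = secLoop fs i := by
  fun_induction secLoop fs i with
  | case1 i h h1 =>
    rw [secLoop]
    have hlt : i + 1 < (a :: fs).length := by simp; omega
    have e1 : (a :: fs)[i+1-1]! = fs[i-1]! := by
      obtain ⟨j, rfl⟩ : ∃ j, i = j + 1 := ⟨i - 1, by omega⟩
      simp
    have e2 : (a :: fs)[i+1]! = fs[i]! := by simp
    rw [dif_pos hlt, e1, e2, if_pos h1]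
  | case2 i h h1 h2 =>
    rw [secLoop]
    have hlt : i + 1 < (a :: fs).length := by simp; omega
    have e1 : (a :: fs)[i+1-1]! = fs[i-1]! := by
      obtain ⟨j, rfl⟩ : ∃ j, i = j + 1 := ⟨i - 1, by omega⟩
      simp
    have e2 : (a :: fs)[i+1]! = fs[i]! := by simp
    rw [dif_pos hlt, e1, e2, if_neg h1, if_pos h2]
  | case3 i h h1 h2 ih =>
    rw [secLoop]
    have hlt : i + 1 < (a :: fs).length := by simp; omega
    have e1 : (a :: fs)[i+1-1]! = fs[i-1]! := by
      obtain ⟨j, rfl⟩ : ∃ j, i = j + 1 := ⟨i - 1, by omega⟩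
      simp
    have e2 : (a :: fs)[i+1]! = fs[i]! := by simp
    rw [dif_pos hlt, e1, e2, if_neg h1, if_neg h2]
    exact ih (by omega)
  | case4 i h =>
    rw [secLoop]
    have hge : ¬ (i + 1 < (a :: fs).length) := by simp; omega
    rw [dif_neg hge]

lemma secLoop_eq_pairScan : ∀ (rest : List Char) (p : Char),
    secLoop (p :: rest) 1 = pairScan (some p) rest := by
  intro rest
  induction rest with
  | nil =>
    intro p
    rw [secLoop, dif_neg (by simp)]
    rfl
  | cons c rs ih =>
    intro p
    rw [secLoop]
    have hlt : 1 < (p :: c :: rs).length := by simp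
    rw [dif_pos hlt]
    have e1 : (p :: c :: rs)[1-1]! = p := by simp
    have e2 : (p :: c :: rs)[1]! = c := by simp
    rw [e1, e2]
    by_cases h1 : p = 'T' ∧ c = '$'
    · rw [if_pos h1]; simp [pairScan, h1]
    · rw [if_neg h1]
      by_cases h2 : p = '$' ∧ c = 'T'
      · rw [if_pos h2]; simp [pairScan, h2]
      · rw [if_neg h2]
        have hs : secLoop (p :: c :: rs) 2 = secLoop (c :: rs) 1 :=
          secLoop_shift (c :: rs) p 1 (by omega)
        rw [hs, ih c]
        simp only [pairScan, if_neg (show ¬((p = 'T' ∧ c = '$') ∨ (p = '$' ∧ c = 'T')) by tauto)]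

-- ===== VERDICT (by name: the statement is the Claim_ definition above) =====
theorem security_spec : Claim_equal_security := by
  intro s _
  unfold Spec_security security security_alt
  rw [altLoop_eq_pairScan]
  show secLoop (filterOutEmptySpaces s).toList 1 = pairScan none (s.toList.filter (· ≠ 'x'))
  rw [filterOut_toList]
  cases h : s.toList.filter (· ≠ 'x') with
  | nil => rw [secLoop, dif_neg (by simp)]; rfl
  | cons p rest =>
    rw [secLoop_eq_pairScan rest p]
    rfl
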